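-- pv_equiv track=rewrite | github.com/colegleason/chroma-scripts | osc/config.py | maplights
-- ===== SOURCE A (Python) =====
-- order = [
--   43,  36,  41,  45,  44,  47,
--   38,  39,  42,  46,  37,  40,
--   34,  35,  33,  32,  24,   0,
--   20,  23,  21,  25,  18,  27,
--   29,  17,  28,  26,  19,  30,
--    6,  22,  16,  15,  10,  31,
--    2,   4,   3,  12,  11,  13,
--    7,   1,   5,   8,   9,  14,
-- ]
--
-- def maplights(array):
-- 	"""
-- 	Given a list of n tuples in the form of (R,G,B), return a list of the same size,
-- 	corresponding to how they're arranged on the ceiling.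
-- 	"""
-- 	out = [(0,0,0)]*len(order)
-- 	for i in range(len(order)):
-- 	  try:
-- 	    out[order[i]] = array[i]
-- 	  except IndexError:
-- 	    pass
--
-- 	return out
-- ===== SOURCE B (Python) =====
-- order = [
--   43,  36,  41,  45,  44,  47,
--   38,  39,  42,  46,  37,  40,
--   34,  35,  33,  32,  24,   0,
--   20,  23,  21,  25,  18,  27,
--   29,  17,  28,  26,  19,  30,
--    6,  22,  16,  15,  10,  31,
--    2,   4,   3,  12,  11,  13,
--    7,   1,   5,   8,   9,  14,
-- ]
--
-- # Inverse permutation: inv[order[i]] = i, so destination j receives source inv[j].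
-- inv = [0] * len(order)
-- for _i, _j in enumerate(order):
--     inv[_j] = _i
--
-- def maplights(array):
--     """
--     Given a list of n tuples in the form of (R,G,B), return a list of the same size,
--     corresponding to how they're arranged on the ceiling.
--     """
--     return [array[inv[j]] if inv[j] < len(array) else (0, 0, 0)
--             for j in range(len(order))]
-- ===== Notes on version B (the rewrite author's own statement) =====
-- stated objective: alternative
-- what changed: B precomputes the inverse permutation once and builds the output as a gather over the 48 destination positions (a list comprehension), instead of A's scatter over sources into a preallocated list with try/except on IndexError.
import Mathlib
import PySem

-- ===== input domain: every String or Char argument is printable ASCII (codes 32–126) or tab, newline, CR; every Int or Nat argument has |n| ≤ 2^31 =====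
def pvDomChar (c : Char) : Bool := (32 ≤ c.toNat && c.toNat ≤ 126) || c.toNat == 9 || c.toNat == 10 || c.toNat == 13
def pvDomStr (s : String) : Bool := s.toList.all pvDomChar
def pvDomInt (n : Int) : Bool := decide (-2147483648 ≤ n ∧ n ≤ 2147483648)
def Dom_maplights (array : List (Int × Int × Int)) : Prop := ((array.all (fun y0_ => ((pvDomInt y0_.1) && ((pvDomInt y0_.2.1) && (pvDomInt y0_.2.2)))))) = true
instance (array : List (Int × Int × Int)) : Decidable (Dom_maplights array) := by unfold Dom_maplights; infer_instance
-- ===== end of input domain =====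

-- B rebuilds the output as a gather over the 48 destination slots via a precomputed
-- inverse permutation instead of A's scatter with try/except (objective: alternative).

-- ===== PORT A =====
-- the module-level `order` list
def orderPy : List Int := [43, 36, 41, 45, 44, 47, 38, 39, 42, 46, 37, 40, 34, 35, 33, 32, 24, 0, 20, 23, 21, 25, 18, 27, 29, 17, 28, 26, 19, 30, 6, 22, 16, 15, 10, 31, 2, 4, 3, 12, 11, 13, 7, 1, 5, 8, 9, 14]

-- literal port of A: preallocated [(0,0,0)]*48, scatter loop; array[i] raising
-- IndexError (pyGet? = none) is the caught `except IndexError: pass`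
def maplights (array : List (Int × Int × Int)) : List (Int × Int × Int) :=
  let out := List.replicate orderPy.length ((0 : Int), (0 : Int), (0 : Int))
  (List.range orderPy.length).foldl (fun out (i : Nat) =>
    match PySem.List.pyGet? array (i : Int) with
    | some v => PySem.List.pySetD out (PySem.List.pyGetD orderPy (i : Int) 0) v
    | none => out) out

-- ===== PORT B =====
-- the module-level inverse table: invPy[orderPy[i]] = i
def invPy : List Int := [17, 43, 36, 38, 37, 44, 30, 42, 45, 46, 34, 40, 39, 41, 47, 33, 32, 25, 22, 28, 18, 20, 31, 19, 16, 21, 27, 23, 26, 24, 29, 35, 15, 14, 12, 13, 1, 10, 6, 7, 11, 2, 8, 0, 4, 3, 9, 5]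

-- literal port of B: list comprehension over the 48 destinations, gathering from array
def maplights_alt (array : List (Int × Int × Int)) : List (Int × Int × Int) :=
  (List.range orderPy.length).map (fun (j : Nat) =>
    let i := PySem.List.pyGetD invPy (j : Int) 0
    if i < (array.length : Int) then PySem.List.pyGetD array i ((0 : Int), (0 : Int), (0 : Int))
    else ((0 : Int), (0 : Int), (0 : Int)))

-- ===== PRECONDITION & SPEC =====
def Spec_maplights (array : List (Int × Int × Int)) (out : List (Int × Int × Int)) : Prop := out = maplights_alt array
instance (array : List (Int × Int × Int)) (out : List (Int × Int × Int)) : Decidable (Spec_maplights array out) := by unfold Spec_maplights; infer_instance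

-- ===== CLAIM (what is proved, stated in full; the proofs are below) =====
def Claim_equal_maplights : Prop := ∀ (array : List (Int × Int × Int)), Dom_maplights array → Spec_maplights array (maplights array)

-- ===== LEMMAS AND PROOFS =====

-- Nat versions of the two table lookups
def ordN (i : Nat) : Nat := (PySem.List.pyGetD orderPy (i : Int) 0).toNat
def invN (j : Nat) : Nat := (PySem.List.pyGetD invPy (j : Int) 0).toNat

theorem ord_cast : ∀ i : Nat, i < 48 → PySem.List.pyGetD orderPy (i : Int) 0 = ((ordN i : Nat) : Int) := by decide
theorem inv_cast : ∀ j : Nat, j < 48 → PySem.List.pyGetD invPy (j : Int) 0 = ((invN j : Nat) : Int) := by decide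
theorem ord_lt : ∀ i : Nat, i < 48 → ordN i < 48 := by decide
theorem inv_lt : ∀ j : Nat, j < 48 → invN j < 48 := by decide
theorem inv_ord : ∀ i : Nat, i < 48 → invN (ordN i) = i := by decide
theorem ord_inv : ∀ j : Nat, j < 48 → ordN (invN j) = j := by decide

-- invariant of A's scatter loop: after scattering the first n sources, slot j holds
-- array[invN j] iff its source invN j is among them and in range, else the (0,0,0) fill
theorem foldA_inv (array : List (Int × Int × Int)) :
    ∀ n, n ≤ 48 →
    (((List.range n).foldl (fun out (i : Nat) =>
        match PySem.List.pyGet? array (i : Int) with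
        | some v => PySem.List.pySetD out (PySem.List.pyGetD orderPy (i : Int) 0) v
        | none => out) (List.replicate 48 ((0 : Int), (0 : Int), (0 : Int)))).length = 48 ∧
     ∀ j, j < 48 →
      ((List.range n).foldl (fun out (i : Nat) =>
        match PySem.List.pyGet? array (i : Int) with
        | some v => PySem.List.pySetD out (PySem.List.pyGetD orderPy (i : Int) 0) v
        | none => out) (List.replicate 48 ((0 : Int), (0 : Int), (0 : Int))))[j]? =
        some (if invN j < n ∧ invN j < array.length
              then array.getD (invN j) ((0 : Int), (0 : Int), (0 : Int))
              else ((0 : Int), (0 : Int), (0 : Int)))) := by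
  intro n
  induction n with
  | zero =>
    intro _
    simp only [List.range_zero, List.foldl_nil]
    refine ⟨by simp, ?_⟩
    intro j hj
    rw [List.getElem?_replicate, if_pos hj, if_neg (fun h => absurd h.1 (Nat.not_lt_zero _))]
  | succ n ih =>
    intro hn
    obtain ⟨ihlen, ihget⟩ := ih (by omega)
    simp only [PySem.List.pyGet?_natCast] at ihlen ihget
    cases h : array[n]? with
    | none =>
      have hlen : array.length ≤ n := by
        have := List.getElem?_eq_none_iff.mp h
        omega
      simp only [List.range_succ, List.foldl_append, List.foldl_cons, List.foldl_nil,
        PySem.List.pyGet?_natCast, h]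
      refine ⟨ihlen, ?_⟩
      intro j hj
      rw [ihget j hj]
      congr 1
      have heq : (invN j < n + 1 ∧ invN j < array.length) ↔ (invN j < n ∧ invN j < array.length) := by
        omega
      simp only [heq]
    | some v =>
      have hnlen : n < array.length := by
        by_contra hc
        rw [List.getElem?_eq_none_iff.mpr (by omega)] at h
        simp at h
      simp only [List.range_succ, List.foldl_append, List.foldl_cons, List.foldl_nil,
        PySem.List.pyGet?_natCast, h]
      rw [ord_cast n (by omega), PySem.List.pySetD_natCast]
      refine ⟨by rw [List.length_set, ihlen], ?_⟩
      intro j hj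
      rw [List.getElem?_set]
      by_cases hoj : ordN n = j
      · have hinv : invN j = n := by rw [← hoj]; exact inv_ord n (by omega)
        rw [if_pos hoj, if_pos (by rw [ihlen]; exact hoj ▸ ord_lt n (by omega))]
        have hv : v = array.getD n ((0 : Int), (0 : Int), (0 : Int)) := by
          rw [List.getD_eq_getElem?_getD, h]; rfl
        rw [hv, hinv]
        rw [if_pos ⟨by omega, hnlen⟩]
      · have hne : invN j ≠ n := by
          intro hc
          exact hoj (by rw [← hc]; exact ord_inv j hj)
        rw [if_neg hoj, ihget j hj]
        congr 1
        have heq : (invN j < n + 1 ∧ invN j < array.length) ↔ (invN j < n ∧ invN j < array.length) := by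
          omega
        simp only [heq]

theorem maplights_eq_alt (array : List (Int × Int × Int)) :
    maplights array = maplights_alt array := by
  obtain ⟨hlen, hget⟩ := foldA_inv array 48 (le_refl 48)
  have hA : maplights array =
      (List.range 48).foldl (fun out (i : Nat) =>
        match PySem.List.pyGet? array (i : Int) with
        | some v => PySem.List.pySetD out (PySem.List.pyGetD orderPy (i : Int) 0) v
        | none => out) (List.replicate 48 ((0 : Int), (0 : Int), (0 : Int))) := rfl
  have hB : maplights_alt array =
      (List.range 48).map (fun (j : Nat) =>
        let i := PySem.List.pyGetD invPy (j : Int) 0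
        if i < (array.length : Int) then PySem.List.pyGetD array i ((0 : Int), (0 : Int), (0 : Int))
        else ((0 : Int), (0 : Int), (0 : Int))) := rfl
  rw [hA, hB]
  apply List.ext_getElem?
  intro j
  by_cases hj : j < 48
  · rw [List.getElem?_map, List.getElem?_range hj, hget j hj]
    simp only [Option.map_some]
    simp only [inv_cast j hj, PySem.List.pyGetD_natCast]
    have hcast : ((invN j : Nat) : Int) < (array.length : Int) ↔ invN j < array.length := by
      exact_mod_cast Iff.rfl
    have h48 : invN j < 48 := inv_lt j hj
    by_cases hl : invN j < array.length
    · rw [if_pos ⟨h48, hl⟩]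
      rw [if_pos (hcast.mpr hl)]
    · rw [if_neg (fun h => hl h.2)]
      rw [if_neg (fun hc => hl (hcast.mp hc))]
  · rw [List.getElem?_eq_none_iff.mpr (by rw [hlen]; omega),
        List.getElem?_eq_none_iff.mpr (by rw [List.length_map, List.length_range]; omega)]

-- ===== VERDICT (by name: the statement is the Claim_ definition above) =====
theorem maplights_spec : Claim_equal_maplights := by
  intro array _
  exact maplights_eq_alt array
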